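-- pv_equiv track=rewrite | github.com/phia-francis/discovery-signal-scout-widget | agent/signal_scout/dedupe.py | cap_per_source
-- ===== SOURCE A (Python) =====
-- from typing import Dict, List
--
-- def cap_per_source(items: List[Dict], cap: int) -> List[Dict]:
--     buckets = {}
--     out = []
--     for it in sorted(items, key=lambda x: x["date"], reverse=True):
--         s = it["source"]
--         if buckets.get(s, 0) >= cap:
--             continue
--         buckets[s] = buckets.get(s, 0) + 1
--         out.append(it)
--     return out
-- ===== SOURCE B (Python) =====
-- def cap_per_source(items, cap):
--     ordered = sorted(items, key=lambda x: x["date"], reverse=True)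
--     return [it for i, it in enumerate(ordered)
--             if sum(1 for j in range(i) if ordered[j]["source"] == it["source"]) < cap]
-- ===== Notes on version B (the rewrite author's own statement) =====
-- stated objective: alternative
-- what changed: Replaces A's stateful per-source counter dict with a stateless characterization: after sorting by date descending, an item is kept iff fewer than cap earlier items in the sorted order share its source, computed by a prefix count.
import Mathlib
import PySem

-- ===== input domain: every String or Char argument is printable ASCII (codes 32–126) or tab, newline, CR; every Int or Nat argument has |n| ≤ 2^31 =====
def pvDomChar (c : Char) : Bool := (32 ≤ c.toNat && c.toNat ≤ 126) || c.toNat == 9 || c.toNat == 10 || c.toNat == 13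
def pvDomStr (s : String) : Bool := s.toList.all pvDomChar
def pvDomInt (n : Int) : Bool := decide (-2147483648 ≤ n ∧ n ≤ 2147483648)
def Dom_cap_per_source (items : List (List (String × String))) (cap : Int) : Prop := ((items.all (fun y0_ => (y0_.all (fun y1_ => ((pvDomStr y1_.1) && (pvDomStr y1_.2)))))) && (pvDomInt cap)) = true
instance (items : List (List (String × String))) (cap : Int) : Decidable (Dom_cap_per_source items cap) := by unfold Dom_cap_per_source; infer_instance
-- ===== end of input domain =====

-- B replaces A's stateful per-source counter dict with a stateless prefix-count test on the
-- date-sorted list (alternative decomposition, same results; not claimed faster).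

-- shared helper: it[k] for a Python dict modelled as an association list (first match);
-- total with default "" — Pre_ below restricts to inputs where the keys are present, i.e. where Python does not raise KeyError
def pvGet (it : List (String × String)) (k : String) : String :=
  ((it.find? (fun p => p.1 == k)).map (·.2)).getD ""

-- ===== PORT A =====
def cap_per_source (items : List (List (String × String))) (cap : Int) : List (List (String × String)) :=
  ((PySem.List.sorted items (fun x => pvGet x "date") true).foldl
    (fun (st : PySem.Dict String Int × List (List (String × String))) it =>
      let s := pvGet it "source"
      if st.1.getD s 0 ≥ cap then st
      else (st.1.insert s (st.1.getD s 0 + 1), st.2 ++ [it]))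
    (PySem.Dict.empty, [])).2

-- ===== PORT B =====
-- sum(1 for j in range(i) if ordered[j]["source"] == it["source"]) is ported as countP over ordered.take i (exact: range(i) enumerates that prefix)
def cap_per_source_alt (items : List (List (String × String))) (cap : Int) : List (List (String × String)) :=
  let ordered := PySem.List.sorted items (fun x => pvGet x "date") true
  (ordered.zipIdx.filter
      (fun p => ((((ordered.take p.2).countP (fun j => pvGet j "source" == pvGet p.1 "source")) : Int) < cap))).map (·.1)

-- ===== PRECONDITION & SPEC =====
-- Pre_: every item has the "date" and "source" keys; on any other input Python A raises KeyError
def Pre_cap_per_source (items : List (List (String × String))) (cap : Int) : Prop :=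
  (items.all (fun it => ((it.find? (fun p => p.1 == "date")).isSome && (it.find? (fun p => p.1 == "source")).isSome))) = true
instance (items : List (List (String × String))) (cap : Int) : Decidable (Pre_cap_per_source items cap) := by unfold Pre_cap_per_source; infer_instance
def pvWitness_cap_per_source : (List (List (String × String))) × Int :=
  ([[("date", "2024-01-02"), ("source", "x")], [("date", "2024-01-01"), ("source", "x")]], 1)

def Spec_cap_per_source (items : List (List (String × String))) (cap : Int) (out : List (List (String × String))) : Prop := out = cap_per_source_alt items cap
instance (items : List (List (String × String))) (cap : Int) (out : List (List (String × String))) : Decidable (Spec_cap_per_source items cap out) := by unfold Spec_cap_per_source; infer_instance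

-- ===== CLAIM (what is proved, stated in full; the proofs are below) =====
def Claim_equal_cap_per_source : Prop := ∀ (items : List (List (String × String))) (cap : Int), Dom_cap_per_source items cap → Pre_cap_per_source items cap → Spec_cap_per_source items cap (cap_per_source items cap)

-- ===== LEMMAS AND PROOFS =====

-- number of items of source s in l, as an Int
def pvCnt (s : String) (l : List (List (String × String))) : Int :=
  ((l.countP (fun j => pvGet j "source" == s)) : Int)

-- common model: walk the suffix, keeping an item iff fewer than cap same-source items occur in the prefix walked so far
def pvModel (cap : Int) (pre : List (List (String × String))) :
    List (List (String × String)) → List (List (String × String))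
  | [] => []
  | x :: xs =>
      (if pvCnt (pvGet x "source") pre < cap then [x] else []) ++ pvModel cap (pre ++ [x]) xs

theorem pvCnt_append_singleton (s : String) (pre : List (List (String × String))) (x : List (String × String)) :
    pvCnt s (pre ++ [x]) = pvCnt s pre + (if pvGet x "source" == s then 1 else 0) := by
  simp [pvCnt, List.countP_append, List.countP_cons]

-- the invariant tying A's buckets dict to prefix counts
def pvInv (cap : Int) (b : PySem.Dict String Int) (pre : List (List (String × String))) : Prop :=
  ∀ s : String, (b.getD s 0 ≥ cap ↔ pvCnt s pre ≥ cap) ∧ (b.getD s 0 < cap → b.getD s 0 = pvCnt s pre)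

theorem pvLoopA (cap : Int) :
    ∀ (suf : List (List (String × String))) (b : PySem.Dict String Int)
      (out pre : List (List (String × String))), pvInv cap b pre →
      (suf.foldl
        (fun (st : PySem.Dict String Int × List (List (String × String))) it =>
          let s := pvGet it "source"
          if st.1.getD s 0 ≥ cap then st
          else (st.1.insert s (st.1.getD s 0 + 1), st.2 ++ [it]))
        (b, out)).2 = out ++ pvModel cap pre suf := by
  intro suf
  induction suf with
  | nil => intro b out pre _; simp [pvModel]
  | cons x xs ih =>
    intro b out pre hinv
    have hx := hinv (pvGet x "source")
    by_cases h : b.getD (pvGet x "source") 0 ≥ cap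
    · have hcnt : pvCnt (pvGet x "source") pre ≥ cap := hx.1.mp h
      have hc : ¬ pvCnt (pvGet x "source") pre < cap := by omega
      have hinv' : pvInv cap b (pre ++ [x]) := by
        intro s
        rcases hinv s with ⟨h1, h2⟩
        rw [pvCnt_append_singleton]
        by_cases hs : pvGet x "source" = s
        · subst hs
          simp only [beq_self_eq_true, if_true]
          exact ⟨⟨fun _ => by omega, fun _ => h⟩, fun hb => absurd h (by omega)⟩
        · have hne : (pvGet x "source" == s) = false := by simpa using hs
          simp only [hne, Bool.false_eq_true, if_false]
          exact ⟨⟨fun hb => by have := h1.mp hb; omega, fun hb => h1.mpr (by omega)⟩, fun hb => by have := h2 hb; omega⟩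
      simp only [List.foldl_cons, if_pos h]
      rw [ih b out (pre ++ [x]) hinv', pvModel, if_neg hc, List.nil_append]
    · have hlt : b.getD (pvGet x "source") 0 < cap := by omega
      have heq : b.getD (pvGet x "source") 0 = pvCnt (pvGet x "source") pre := hx.2 hlt
      have hc : pvCnt (pvGet x "source") pre < cap := by omega
      have hinv' : pvInv cap (b.insert (pvGet x "source") (b.getD (pvGet x "source") 0 + 1)) (pre ++ [x]) := by
        intro s
        rw [pvCnt_append_singleton, PySem.Dict.getD_insert]
        by_cases hs : s = pvGet x "source"
        · have hbe : (pvGet x "source" == s) = true := by simpa using hs.symm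
          rw [if_pos hs, hbe, if_pos rfl, hs, heq]
          exact ⟨by omega, by omega⟩
        · rcases hinv s with ⟨h1, h2⟩
          have hne : (pvGet x "source" == s) = false := by
            simp only [beq_eq_false_iff_ne, ne_eq]; exact fun hh => hs hh.symm
          rw [if_neg hs, hne, if_neg (by simp)]
          exact ⟨⟨fun hb => by have := h1.mp hb; omega, fun hb => h1.mpr (by omega)⟩, fun hb => by have := h2 hb; omega⟩
      simp only [List.foldl_cons, if_neg h]
      rw [ih _ _ (pre ++ [x]) hinv', pvModel, if_pos hc, List.append_assoc]

theorem pvLoopB (cap : Int) (ordered : List (List (String × String))) :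
    ∀ (suf pre : List (List (String × String))), ordered = pre ++ suf →
      ((suf.zipIdx pre.length).filter
          (fun p => ((((ordered.take p.2).countP (fun j => pvGet j "source" == pvGet p.1 "source")) : Int) < cap))).map (·.1)
        = pvModel cap pre suf := by
  intro suf
  induction suf with
  | nil => intro pre _; simp [pvModel]
  | cons x xs ih =>
    intro pre hpre
    have htake : ordered.take pre.length = pre := by
      rw [hpre]; exact List.take_left
    have hrec := ih (pre ++ [x]) (by rw [hpre]; simp)
    simp only [List.length_append, List.length_cons, List.length_nil, Nat.zero_add] at hrec
    simp only [List.zipIdx_cons, List.filter_cons, htake]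
    by_cases hc : pvCnt (pvGet x "source") pre < cap
    · have : (decide (((pre.countP (fun j => pvGet j "source" == pvGet x "source")) : Int) < cap)) = true := by
        simpa [pvCnt] using hc
      simp only [pvModel, if_pos hc, List.singleton_append]
      simp [this, hrec]
    · have : (decide (((pre.countP (fun j => pvGet j "source" == pvGet x "source")) : Int) < cap)) = false := by
        simpa [pvCnt] using hc
      simp only [pvModel, if_neg hc, List.nil_append]
      simp [this, hrec]

-- ===== VERDICT (by name: the statement is the Claim_ definition above) =====
theorem cap_per_source_spec : Claim_equal_cap_per_source := by
  intro items cap _ _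
  unfold Spec_cap_per_source cap_per_source cap_per_source_alt
  have hinv0 : pvInv cap PySem.Dict.empty [] := by
    intro s
    constructor
    · simp [PySem.Dict.getD, PySem.Dict.get?, PySem.Dict.empty, pvCnt]
    · intro _; simp [PySem.Dict.getD, PySem.Dict.get?, PySem.Dict.empty, pvCnt]
  rw [pvLoopA cap _ PySem.Dict.empty [] [] hinv0, List.nil_append]
  exact (pvLoopB cap _ _ [] (by simp)).symm
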